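-- pv_equiv track=rewrite | github.com/Symbolk/AlgInPy | tree/1519number-of-nodes-in-the-sub-tree-with-the-same-label.py | countSubTrees2
-- ===== SOURCE A (Python) =====
-- from typing import List
-- import collections
--
-- def countSubTrees2(n: int, edges: List[List[int]], labels: str) -> List[int]:
--     g = collections.defaultdict(list)
--     for u, v in edges:
--         g[u].append(v)
--         g[v].append(u)
--     visited = [False] * n
--     res = [0] * n
--
--     def dfs(cur):
--         visited[cur] = True
--         cnt = collections.defaultdict(int)
--         cnt[labels[cur]] = 1
--         for nxt in g[cur]:
--             if not visited[nxt]: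
--                 child = dfs(nxt)
--                 for c in child:
--                     cnt[c] += child[c]
--         res[cur] = cnt[labels[cur]]
--         return cnt
--
--     dfs(0)
--     return res
-- ===== SOURCE B (Python) =====
-- def countSubTrees2(n, edges, labels):
--     # Iterative version: explicit frame stack (node, next-neighbor index, counter)
--     # replaces the recursion; child counters are merged into the parent on pop.
--     g = {}
--     for u, v in edges:
--         g.setdefault(u, []).append(v)
--         g.setdefault(v, []).append(u)
--     visited = [False] * n
--     res = [0] * n
--     visited[0] = True
--     stack = [(0, 0, {labels[0]: 1})]
--     while stack:
--         cur, i, cnt = stack[-1]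
--         nbrs = g.get(cur, [])
--         if i == len(nbrs):
--             res[cur] = cnt[labels[cur]]
--             stack.pop()
--             if stack:
--                 _, _, pcnt = stack[-1]
--                 for c in cnt:
--                     pcnt[c] = pcnt.get(c, 0) + cnt[c]
--         else:
--             stack[-1] = (cur, i + 1, cnt)
--             nxt = nbrs[i]
--             if not visited[nxt]:
--                 visited[nxt] = True
--                 stack.append((nxt, 0, {labels[nxt]: 1}))
--     return res
-- ===== Notes on version B (the rewrite author's own statement) =====
-- stated objective: alternative
-- what changed: Replaces A's recursive dfs (nested closure mutating visited/res) by an iterative DFS over an explicit frame stack of (node, next-neighbour index, counter) triples that merges each finished child's counter into its parent frame on pop.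
-- outside the precondition, e.g. on countSubTrees2(2, [[0, -1], [0, 1], [1, 9]], 'ab'): A returns [1, 1], B returns [1, 1]
import Mathlib
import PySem

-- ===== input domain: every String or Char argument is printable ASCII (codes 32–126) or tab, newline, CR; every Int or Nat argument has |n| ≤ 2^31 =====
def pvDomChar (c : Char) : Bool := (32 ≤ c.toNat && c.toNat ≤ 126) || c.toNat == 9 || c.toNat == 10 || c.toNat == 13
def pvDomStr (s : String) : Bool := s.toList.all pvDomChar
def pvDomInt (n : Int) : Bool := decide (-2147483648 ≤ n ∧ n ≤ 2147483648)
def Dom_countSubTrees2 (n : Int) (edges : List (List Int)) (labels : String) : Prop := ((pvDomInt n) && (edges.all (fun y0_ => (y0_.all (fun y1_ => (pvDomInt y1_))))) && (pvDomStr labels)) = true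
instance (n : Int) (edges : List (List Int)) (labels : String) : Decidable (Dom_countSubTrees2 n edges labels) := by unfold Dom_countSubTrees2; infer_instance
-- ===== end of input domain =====

-- B replaces A's recursive DFS by an iterative DFS with an explicit frame stack
-- (node, next-neighbour index, counter), merging each child's counter into its
-- parent frame on pop; same return value (objective: alternative decomposition).

-- ===== PORT A =====
-- shared helpers (identical constructs in both Pythons): adjacency building,
-- list indexing/assignment (Python negative-index semantics via PySem), the
-- {label: 1} singleton counter and the 'for c in child: cnt[c] += child[c]' merge.
def pvVisAt (vis : List Bool) (i : Int) : Bool := (PySem.List.pyGet? vis i).getD true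
def pvSetTrue (vis : List Bool) (i : Int) : List Bool := PySem.List.pySetD vis i true
def pvLabelAt (labels : List Char) (i : Int) : Char := (PySem.List.pyGet? labels i).getD ' '
def pvCnt1 (labels : List Char) (i : Int) : PySem.Dict Char Int :=
  PySem.Dict.empty.insert (pvLabelAt labels i) 1
def pvMergeCnt (a b : PySem.Dict Char Int) : PySem.Dict Char Int :=
  b.keys.foldl (fun d c => d.insert c (d.getD c 0 + b.getD c 0)) a
def pvBuildG (edges : List (List Int)) : PySem.Dict Int (List Int) :=
  edges.foldl (fun g e =>
    match e with
    | [u, v] =>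
      let g1 := g.insert u (g.getD u [] ++ [v])
      g1.insert v (g1.getD v [] ++ [u])
    | _ => g) PySem.Dict.empty

-- A's recursive dfs; fuel n.toNat suffices: each call marks an unvisited slot.
def pvDfsA (g : PySem.Dict Int (List Int)) (labels : List Char) :
    Nat → Int → List Bool → List Int → PySem.Dict Char Int × List Bool × List Int
  | 0, _, vis, res => (PySem.Dict.empty, vis, res)
  | fuel+1, cur, vis, res =>
    let s := (g.getD cur []).foldl
      (fun st nxt =>
        if pvVisAt st.2.1 nxt then st
        else
          let r := pvDfsA g labels fuel nxt st.2.1 st.2.2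
          (pvMergeCnt st.1 r.1, r.2.1, r.2.2))
      (pvCnt1 labels cur, pvSetTrue vis cur, res)
    (s.1, s.2.1, PySem.List.pySetD s.2.2 cur (s.1.getD (pvLabelAt labels cur) 0))

def countSubTrees2 (n : Int) (edges : List (List Int)) (labels : String) : List Int :=
  let g := pvBuildG edges
  let vis := List.replicate n.toNat false
  let res := List.replicate n.toNat (0 : Int)
  (pvDfsA g labels.toList n.toNat 0 vis res).2.2

-- ===== PORT B =====
-- termination facts for the stack machine (cited by pvRunB's decreasing_by)
theorem pvCountFalseSetTrueLt (xs : List Bool) (k : Nat) (h : xs[k]? = some false) :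
    (xs.set k true).count false < xs.count false := by
  induction xs generalizing k with
  | nil => simp at h
  | cons a t ih =>
    cases k with
    | zero => simp_all
    | succ k =>
      simp only [List.getElem?_cons_succ] at h
      simp only [List.set_cons_succ, List.count_cons]
      have := ih k h
      split <;> omega

def pvFalses (vis : List Bool) : Nat := vis.count false

theorem pvFalsesSetTrueLt (vis : List Bool) (i : Int) (h : pvVisAt vis i = false) :
    pvFalses (pvSetTrue vis i) < pvFalses vis := by
  unfold pvVisAt at h
  unfold pvSetTrue pvFalses PySem.List.pySetD PySem.List.pySet?
  unfold PySem.List.pyGet? at h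
  cases hk : PySem.List.pyIdx? vis.length i with
  | none => simp [hk] at h
  | some k =>
    simp only [hk, Option.bind_some] at h
    cases hg : vis[k]? with
    | none => simp [hg] at h
    | some b =>
      cases b with
      | false => simpa [hk] using pvCountFalseSetTrueLt vis k hg
      | true => simp [hg] at h

-- B's iterative DFS: explicit stack of frames (node, next-neighbour index, counter)
def pvRunB (g : PySem.Dict Int (List Int)) (labels : List Char) :
    List (Int × Nat × PySem.Dict Char Int) → List Bool → List Int → List Int
  | [], _, res => res
  | (cur, i, cnt) :: S, vis, res =>
    let nbrs := g.getD cur []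
    if i = nbrs.length then
      let res1 := PySem.List.pySetD res cur (cnt.getD (pvLabelAt labels cur) 0)
      match S with
      | [] => res1
      | (p, pi, pcnt) :: S' => pvRunB g labels ((p, pi, pvMergeCnt pcnt cnt) :: S') vis res1
    else if h2 : i < nbrs.length then
      let nxt := nbrs[i]
      if pvVisAt vis nxt then pvRunB g labels ((cur, i+1, cnt) :: S) vis res
      else pvRunB g labels ((nxt, 0, pvCnt1 labels nxt) :: (cur, i+1, cnt) :: S)
        (pvSetTrue vis nxt) res
    else res  -- unreachable: i never exceeds len(nbrs) (Python would raise)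
  termination_by st vis _ =>
    (pvFalses vis, (st.map (fun f => (g.getD f.1 []).length - f.2.1)).sum, st.length)
  decreasing_by
  · apply Prod.Lex.right'
    · simp
    · simp [Prod.lex_def]; omega
  · apply Prod.Lex.right'
    · simp
    · have h2' : i < (g.getD cur []).length := h2
      simp [Prod.lex_def]; omega
  · rename_i hv
    apply Prod.Lex.left
    exact pvFalsesSetTrueLt _ _ (by simpa using hv)

def countSubTrees2_alt (n : Int) (edges : List (List Int)) (labels : String) : List Int :=
  let g := pvBuildG edges
  let vis := List.replicate n.toNat false
  let res := List.replicate n.toNat (0 : Int)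
  pvRunB g labels.toList [(0, 0, pvCnt1 labels.toList 0)] (pvSetTrue vis 0) res

-- ===== PRECONDITION & SPEC =====
-- the set of nodes in the undirected component of node 0 (a shape property of the
-- edge list: A touches list indices only at nodes in this component)
def pvReachStep (edges : List (List Int)) (s0 : List Int) : List Int :=
  edges.foldl (fun s e =>
    match e with
    | [u, v] =>
      let s1 := if u ∈ s then PySem.Set.add s v else s
      if v ∈ s1 then PySem.Set.add s1 u else s1
    | _ => s) s0

def pvReach (edges : List (List Int)) : List Int :=
  (List.range (2 * edges.length + 1)).foldl (fun s _ => pvReachStep edges s) [0]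

-- Pre_ excludes the inputs on which A raises (n ≤ 0, edges that are not [u,v] pairs, a
-- node in the component of 0 that is not a valid Python index into visited or labels);
-- requiring every node of the component to be a valid index slightly over-excludes rare
-- inputs on which A still returns because negative-index wraparound aliases such a node
-- with an already-visited one so it is never actually indexed (B returns the same there).
def Pre_countSubTrees2 (n : Int) (edges : List (List Int)) (labels : String) : Prop :=
  1 ≤ n ∧ (∀ e ∈ edges, e.length = 2) ∧
    ∀ x ∈ pvReach edges,
      -n ≤ x ∧ x < n ∧ -(PySem.Str.len labels) ≤ x ∧ x < PySem.Str.len labels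
instance (n : Int) (edges : List (List Int)) (labels : String) : Decidable (Pre_countSubTrees2 n edges labels) := by
  unfold Pre_countSubTrees2; infer_instance

def pvWitness_countSubTrees2 : Int × List (List Int) × String :=
  (1, [], "a")

def Spec_countSubTrees2 (n : Int) (edges : List (List Int)) (labels : String) (out : List Int) : Prop := out = countSubTrees2_alt n edges labels
instance (n : Int) (edges : List (List Int)) (labels : String) (out : List Int) : Decidable (Spec_countSubTrees2 n edges labels out) := by unfold Spec_countSubTrees2; infer_instance

-- ===== CLAIM (what is proved, stated in full; the proofs are below) =====
def Claim_equal_countSubTrees2 : Prop := ∀ (n : Int) (edges : List (List Int)) (labels : String), Dom_countSubTrees2 n edges labels → Pre_countSubTrees2 n edges labels → Spec_countSubTrees2 n edges labels (countSubTrees2 n edges labels)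

-- ===== LEMMAS AND PROOFS =====

-- what pvRunB does when a frame finishes: write res[cur], pop, merge into the parent
def pvFinish (g : PySem.Dict Int (List Int)) (labels : List Char) (cur : Int)
    (S : List (Int × Nat × PySem.Dict Char Int))
    (t : PySem.Dict Char Int × List Bool × List Int) : List Int :=
  let res1 := PySem.List.pySetD t.2.2 cur (t.1.getD (pvLabelAt labels cur) 0)
  match S with
  | [] => res1
  | (p, pi, pcnt) :: S' => pvRunB g labels ((p, pi, pvMergeCnt pcnt t.1) :: S') t.2.1 res1

theorem pvCountFalseSetTrueLe (xs : List Bool) (k : Nat) :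
    (xs.set k true).count false ≤ xs.count false := by
  induction xs generalizing k with
  | nil => simp
  | cons a t ih =>
    cases k with
    | zero => simp [List.count_cons]
    | succ k =>
      simp only [List.set_cons_succ, List.count_cons]
      have := ih k
      split <;> omega

theorem pvFalsesSetTrueLe (vis : List Bool) (i : Int) :
    pvFalses (pvSetTrue vis i) ≤ pvFalses vis := by
  unfold pvFalses pvSetTrue PySem.List.pySetD PySem.List.pySet?
  cases hk : PySem.List.pyIdx? vis.length i with
  | none => simp
  | some k => simpa using pvCountFalseSetTrueLe vis k

-- A's loop body, written projection-style (no let) for rewriting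
def pvStepA (g : PySem.Dict Int (List Int)) (labels : List Char) (fa : Nat)
    (st : PySem.Dict Char Int × List Bool × List Int) (nxt : Int) :
    PySem.Dict Char Int × List Bool × List Int :=
  if pvVisAt st.2.1 nxt then st
  else (pvMergeCnt st.1 (pvDfsA g labels fa nxt st.2.1 st.2.2).1,
    (pvDfsA g labels fa nxt st.2.1 st.2.2).2.1,
    (pvDfsA g labels fa nxt st.2.1 st.2.2).2.2)

theorem pvDfsASucc (g : PySem.Dict Int (List Int)) (labels : List Char) (fb : Nat)
    (cur : Int) (vis : List Bool) (res : List Int) :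
    pvDfsA g labels (fb + 1) cur vis res =
      (((g.getD cur []).foldl (pvStepA g labels fb) (pvCnt1 labels cur, pvSetTrue vis cur, res)).1,
       ((g.getD cur []).foldl (pvStepA g labels fb) (pvCnt1 labels cur, pvSetTrue vis cur, res)).2.1,
       PySem.List.pySetD
         ((g.getD cur []).foldl (pvStepA g labels fb) (pvCnt1 labels cur, pvSetTrue vis cur, res)).2.2
         cur
         (((g.getD cur []).foldl (pvStepA g labels fb) (pvCnt1 labels cur, pvSetTrue vis cur, res)).1.getD
           (pvLabelAt labels cur) 0)) := rfl

theorem pvFalsesDfsALe (g : PySem.Dict Int (List Int)) (labels : List Char) :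
    ∀ (fuel : Nat) (cur : Int) (vis : List Bool) (res : List Int),
      pvFalses (pvDfsA g labels fuel cur vis res).2.1 ≤ pvFalses vis := by
  intro fuel
  induction fuel with
  | zero => intro cur vis res; simp [pvDfsA]
  | succ f ih =>
    intro cur vis res
    have hfold : ∀ (l : List Int) (st : PySem.Dict Char Int × List Bool × List Int),
        pvFalses ((l.foldl (pvStepA g labels f) st).2.1) ≤ pvFalses st.2.1 := by
      intro l
      induction l with
      | nil => intro st; simp
      | cons x t iht =>
        intro st
        simp only [List.foldl_cons]
        refine le_trans (iht _) ?_
        by_cases hv : pvVisAt st.2.1 x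
        · simp [pvStepA, hv]
        · simp only [pvStepA, hv, Bool.false_eq_true, if_false]
          exact ih x st.2.1 st.2.2
    calc pvFalses (pvDfsA g labels (f + 1) cur vis res).2.1
        ≤ pvFalses (pvSetTrue vis cur) := by
          rw [pvDfsASucc]
          exact hfold (g.getD cur []) (pvCnt1 labels cur, pvSetTrue vis cur, res)
      _ ≤ pvFalses vis := pvFalsesSetTrueLe vis cur

theorem pvVisAtFalsePos (vis : List Bool) (i : Int) (h : pvVisAt vis i = false) :
    1 ≤ pvFalses vis := by
  unfold pvVisAt at h
  cases hg : PySem.List.pyGet? vis i with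
  | none => simp [hg] at h
  | some b =>
    cases b with
    | false =>
      have hm : false ∈ vis := PySem.List.mem_of_pyGet?_eq_some _ hg
      exact List.count_pos_iff.mpr hm
    | true => simp [hg] at h

theorem pvSim (g : PySem.Dict Int (List Int)) (labels : List Char)
    (fa : Nat) (cur : Int) (i : Nat) (cnt : PySem.Dict Char Int)
    (S : List (Int × Nat × PySem.Dict Char Int)) (vis : List Bool) (res : List Int)
    (h : pvFalses vis ≤ fa) (hile : i ≤ (g.getD cur []).length) :
    pvRunB g labels ((cur, i, cnt) :: S) vis res =
      pvFinish g labels cur S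
        (((g.getD cur []).drop i).foldl (pvStepA g labels fa) (cnt, vis, res)) := by
  by_cases hi : i = (g.getD cur []).length
  · rw [pvRunB]
    simp only [hi, List.drop_length, List.foldl_nil]
    cases S with
    | nil => rfl
    | cons fr S' => rfl
  · have h2 : i < (g.getD cur []).length := lt_of_le_of_ne hile hi
    have hdrop : (g.getD cur []).drop i
        = (g.getD cur [])[i] :: (g.getD cur []).drop (i + 1) := List.drop_eq_getElem_cons h2
    by_cases hv : pvVisAt vis ((g.getD cur [])[i]) = true
    · rw [pvRunB]
      simp only [if_neg hi, dif_pos h2, if_pos hv]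
      rw [pvSim g labels fa cur (i + 1) cnt S vis res h (by omega)]
      rw [hdrop, List.foldl_cons]
      rw [show pvStepA g labels fa (cnt, vis, res) ((g.getD cur [])[i]) = (cnt, vis, res) from by
        simp [pvStepA, hv]]
    · have hv' : pvVisAt vis ((g.getD cur [])[i]) = false := by simpa using hv
      have hfa1 : 1 ≤ fa := le_trans (pvVisAtFalsePos vis _ hv') h
      obtain ⟨fb, rfl⟩ : ∃ fb, fa = fb + 1 := ⟨fa - 1, by omega⟩
      have hlt := pvFalsesSetTrueLt vis _ hv'
      rw [pvRunB]
      simp only [if_neg hi, dif_pos h2, hv', Bool.false_eq_true, if_false]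
      rw [pvSim g labels fb ((g.getD cur [])[i]) 0 (pvCnt1 labels ((g.getD cur [])[i]))
          ((cur, i + 1, cnt) :: S) (pvSetTrue vis ((g.getD cur [])[i])) res (by omega)
          (Nat.zero_le _)]
      rw [pvFinish, List.drop_zero]
      have hr := pvDfsASucc g labels fb ((g.getD cur [])[i]) vis res
      rw [pvSim g labels (fb + 1) cur (i + 1) _ S _ _
          (le_trans (by
            have hm := pvFalsesDfsALe g labels (fb + 1) ((g.getD cur [])[i]) vis res
            rw [hr] at hm
            exact hm) h)
          (by omega)]
      rw [hdrop, List.foldl_cons]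
      rw [show pvStepA g labels (fb + 1) (cnt, vis, res) ((g.getD cur [])[i])
          = (pvMergeCnt cnt (pvDfsA g labels (fb + 1) ((g.getD cur [])[i]) vis res).1,
             (pvDfsA g labels (fb + 1) ((g.getD cur [])[i]) vis res).2.1,
             (pvDfsA g labels (fb + 1) ((g.getD cur [])[i]) vis res).2.2) from by
        simp [pvStepA, hv']]
      rw [hr]
  termination_by (fa, (g.getD cur []).length - i)
  decreasing_by
  · exact Prod.Lex.right fa (by omega)
  · exact Prod.Lex.left _ _ (by omega)
  · rw [show fa = fb + 1 from by omega]
    exact Prod.Lex.right (fb + 1) (show (g.getD cur []).length - (i + 1) < (g.getD cur []).length - i from by omega)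

-- ===== VERDICT (by name: the statement is the Claim_ definition above) =====
theorem countSubTrees2_spec : Claim_equal_countSubTrees2 := by
  intro n edges labels _ hpre
  obtain ⟨h1, -, -⟩ := hpre
  unfold Spec_countSubTrees2 countSubTrees2 countSubTrees2_alt
  obtain ⟨m, hm⟩ : ∃ m, n.toNat = m + 1 := ⟨n.toNat - 1, by omega⟩
  rw [hm]
  show (pvDfsA (pvBuildG edges) labels.toList (m + 1) 0 (List.replicate (m + 1) false)
      (List.replicate (m + 1) (0 : Int))).2.2
    = pvRunB (pvBuildG edges) labels.toList [(0, 0, pvCnt1 labels.toList 0)]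
      (pvSetTrue (List.replicate (m + 1) false) 0) (List.replicate (m + 1) (0 : Int))
  have hvis0 : pvVisAt (List.replicate (m + 1) false) (0 : Int) = false := by
    simp [pvVisAt, PySem.List.pyGet?, PySem.List.pyIdx?]
  have hcount : pvFalses (List.replicate (m + 1) false) = m + 1 := by
    simp [pvFalses]
  have hle : pvFalses (pvSetTrue (List.replicate (m + 1) false) 0) ≤ m := by
    have := pvFalsesSetTrueLt (List.replicate (m + 1) false) 0 hvis0
    omega
  rw [pvDfsASucc (pvBuildG edges) labels.toList m 0 (List.replicate (m + 1) false)
    (List.replicate (m + 1) (0 : Int))]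
  rw [pvSim (pvBuildG edges) labels.toList m 0 0 (pvCnt1 labels.toList 0) []
    (pvSetTrue (List.replicate (m + 1) false) 0) (List.replicate (m + 1) (0 : Int))
    hle (Nat.zero_le _)]
  rw [pvFinish, List.drop_zero]
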